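-- pv_equiv track=rewrite | github.com/akshay83/mapl_customization | mapl_customization/customizations_for_mapl/doctype/import_customers/import_customers.py | break_contact_nos
-- ===== SOURCE A (Python) =====
-- def break_contact_nos(contactno):
-- 	if not contactno:
-- 		return None
--
-- 	#Search for '$' and Break
-- 	contact_return = []
-- 	contact_nos = contactno.split('$')
-- 	for c in contact_nos:
-- 		contact_return.extend(c.split(','))
-- 	return contact_return
-- ===== SOURCE B (Python) =====
-- def break_contact_nos(contactno):
--     if not contactno:
--         return None
--     parts = []
--     cur = []
--     for ch in contactno:
--         if ch in '$,':
--             parts.append(''.join(cur))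
--             cur = []
--         else:
--             cur.append(ch)
--     parts.append(''.join(cur))
--     return parts
-- ===== Notes on version B (the rewrite author's own statement) =====
-- stated objective: alternative
-- what changed: Replaces the two-level split (split on '$', then split each piece on ',' and extend) by a single character-at-a-time scan that cuts the current token at either delimiter.
import Mathlib
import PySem

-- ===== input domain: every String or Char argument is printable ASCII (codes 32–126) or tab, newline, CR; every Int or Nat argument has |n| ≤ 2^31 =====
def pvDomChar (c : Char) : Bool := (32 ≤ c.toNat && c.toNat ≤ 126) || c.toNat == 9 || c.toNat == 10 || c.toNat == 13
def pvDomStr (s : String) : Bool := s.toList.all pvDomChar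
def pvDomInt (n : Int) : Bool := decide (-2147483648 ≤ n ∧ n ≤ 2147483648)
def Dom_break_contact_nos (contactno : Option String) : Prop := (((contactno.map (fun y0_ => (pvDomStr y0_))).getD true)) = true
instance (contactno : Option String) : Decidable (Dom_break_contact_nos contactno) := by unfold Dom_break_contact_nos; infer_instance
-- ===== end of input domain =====

-- B replaces A's two-level split (on '$', then each piece on ',') by a single left-to-right
-- character scan cutting the token at either delimiter; alternative decomposition, same cost.


-- ===== PORT A =====
-- strings are ported through List Char; split('$') / split(',') are PySem.Chars.splitOn (exact)
def break_contact_nos (contactno : Option String) : Option (List String) :=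
  match contactno with
  | none => none
  | some s =>
    if s = "" then none
    else
      let contact_nos := PySem.Chars.splitOn s.toList ['$']
      let contact_return :=
        contact_nos.foldl (fun acc c => acc ++ PySem.Chars.splitOn c [',']) []
      some (contact_return.map String.mk)

-- ===== PORT B =====
-- one step of B's scan: cut the current token at '$' or ',', otherwise extend it
def pvBStep (st : List String × List Char) (ch : Char) : List String × List Char :=
  if ch = '$' ∨ ch = ',' then (st.1 ++ [String.mk st.2], ([] : List Char))
  else (st.1, st.2 ++ [ch])

def break_contact_nos_alt (contactno : Option String) : Option (List String) :=
  match contactno with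
  | none => none
  | some s =>
    if s = "" then none
    else
      let st := s.toList.foldl pvBStep ([], [])
      some (st.1 ++ [String.mk st.2])

-- ===== PRECONDITION & SPEC =====
def Spec_break_contact_nos (contactno : Option String) (out : Option (List String)) : Prop := out = break_contact_nos_alt contactno
instance (contactno : Option String) (out : Option (List String)) : Decidable (Spec_break_contact_nos contactno out) := by unfold Spec_break_contact_nos; infer_instance

-- ===== CLAIM (what is proved, stated in full; the proofs are below) =====
def Claim_equal_break_contact_nos : Prop := ∀ (contactno : Option String), Dom_break_contact_nos contactno → Spec_break_contact_nos contactno (break_contact_nos contactno)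

-- ===== LEMMAS AND PROOFS =====

-- prepend p to the head of a list of tokens ([p] if there is none)
def pvPrepHead (p : List Char) : List (List Char) → List (List Char)
  | [] => [p]
  | x :: xs => (p ++ x) :: xs

-- split on one delimiter character, as a structural recursion
def pvSplitc (c : Char) : List Char → List (List Char)
  | [] => [[]]
  | a :: l => if a = c then [] :: pvSplitc c l else pvPrepHead [a] (pvSplitc c l)

-- split on both delimiters at once, as a structural recursion
def pvSplit2 : List Char → List (List Char)
  | [] => [[]]
  | a :: l => if a = '$' ∨ a = ',' then [] :: pvSplit2 l else pvPrepHead [a] (pvSplit2 l)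

theorem pvPrepHead_comp (p q : List Char) (S : List (List Char)) :
    pvPrepHead p (pvPrepHead q S) = pvPrepHead (p ++ q) S := by
  cases S <;> simp [pvPrepHead]

theorem pvSplitc_ne_nil (c : Char) (l : List Char) : pvSplitc c l ≠ [] := by
  induction l with
  | nil => simp [pvSplitc]
  | cons a l ih =>
    simp only [pvSplitc]
    split
    · simp
    · cases h : pvSplitc c l with
      | nil => exact absurd h ih
      | cons x xs => simp [pvPrepHead, h]

theorem pvSplit2_ne_nil (l : List Char) : pvSplit2 l ≠ [] := by
  induction l with
  | nil => simp [pvSplit2]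
  | cons a l ih =>
    simp only [pvSplit2]
    split
    · simp
    · cases h : pvSplit2 l with
      | nil => exact absurd h ih
      | cons x xs => simp [pvPrepHead, h]

-- PySem.Chars.splitOn on a single-character separator is the structural recursion pvSplitc
theorem pvGo_single (c : Char) : ∀ (l : List Char) (fuel : Nat) (cur : List Char)
    (acc : List (List Char)), l.length < fuel →
    PySem.Chars.splitOn.go [c] fuel l cur acc
      = acc.reverse ++ pvPrepHead cur.reverse (pvSplitc c l) := by
  intro l
  induction l with
  | nil =>
    intro fuel cur acc h
    cases fuel with
    | zero => omega
    | succ f => simp [PySem.Chars.splitOn.go, pvSplitc, pvPrepHead]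
  | cons a rest ih =>
    intro fuel cur acc h
    cases fuel with
    | zero => omega
    | succ f =>
      simp only [PySem.Chars.splitOn.go, List.isPrefixOf]
      by_cases hc : c = a
      · subst hc
        simp only [BEq.rfl, Bool.true_and, if_pos]
        rw [show List.drop [c].length (c :: rest) = rest from rfl]
        rw [ih f [] (cur.reverse :: acc) (by simpa using Nat.lt_of_succ_lt_succ h)]
        rw [show pvSplitc c (c :: rest) = [] :: pvSplitc c rest from by simp [pvSplitc]]
        cases hC : pvSplitc c rest with
        | nil => exact absurd hC (pvSplitc_ne_nil c rest)
        | cons x xs => simp [pvPrepHead]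
      · have hba : (c == a) = false := by simp [hc]
        simp only [hba, Bool.false_and, Bool.false_eq_true, if_false]
        rw [ih f (a :: cur) acc (by simpa using Nat.lt_of_succ_lt_succ h)]
        have hne : a ≠ c := fun h' => hc h'.symm
        simp only [pvSplitc, if_neg hne, List.reverse_cons]
        rw [pvPrepHead_comp]

theorem pvSplitOn_single (c : Char) (l : List Char) :
    PySem.Chars.splitOn l [c] = pvSplitc c l := by
  unfold PySem.Chars.splitOn
  rw [pvGo_single c l (l.length + 1) [] [] (by omega)]
  cases h : pvSplitc c l with
  | nil => exact absurd h (pvSplitc_ne_nil c l)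
  | cons x xs => simp [pvPrepHead]

-- folding ++ over a list is flatMap
theorem pvFoldl_append {α β : Type} (f : α → List β) :
    ∀ (L : List α) (acc : List β), L.foldl (fun a c => a ++ f c) acc = acc ++ L.flatMap f := by
  intro L
  induction L with
  | nil => simp
  | cons x L ih => intro acc; simp [List.foldl_cons, ih, List.flatMap_cons]

-- the sequential two-level split flattens to the simultaneous split
theorem pvFlat (l : List Char) :
    (pvSplitc '$' l).flatMap (pvSplitc ',') = pvSplit2 l := by
  induction l with
  | nil => simp [pvSplitc, pvSplit2]
  | cons a l ih =>
    by_cases h1 : a = '$'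
    · subst h1
      simp [pvSplitc, pvSplit2, List.flatMap_cons, ih]
    · cases hS : pvSplitc '$' l with
      | nil => exact absurd hS (pvSplitc_ne_nil '$' l)
      | cons h t =>
        simp only [pvSplitc, if_neg h1, hS, pvPrepHead, List.flatMap_cons,
          List.singleton_append]
        by_cases h2 : a = ','
        · subst h2
          rw [if_pos rfl]
          rw [show pvSplit2 (',' :: l) = [] :: pvSplit2 l from by simp [pvSplit2],
            ← ih, hS]
          simp [List.flatMap_cons]
        · rw [if_neg h2]
          rw [show pvSplit2 (a :: l) = pvPrepHead [a] (pvSplit2 l) from by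
            simp [pvSplit2, h1, h2], ← ih, hS]
          cases hC : pvSplitc ',' h with
          | nil => exact absurd hC (pvSplitc_ne_nil ',' h)
          | cons y ys => simp [hC, List.flatMap_cons, pvPrepHead]

-- invariant of B's scan
theorem pvB_inv : ∀ (l : List Char) (parts : List String) (cur : List Char),
    (l.foldl pvBStep (parts, cur)).1 ++ [String.mk (l.foldl pvBStep (parts, cur)).2]
      = parts ++ (pvPrepHead cur (pvSplit2 l)).map String.mk := by
  intro l
  induction l with
  | nil => intro parts cur; simp [pvPrepHead, pvSplit2]
  | cons a l ih =>
    intro parts cur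
    by_cases h : a = '$' ∨ a = ','
    · simp only [List.foldl_cons, pvBStep, if_pos h]
      rw [ih]
      cases hS : pvSplit2 l with
      | nil => exact absurd hS (pvSplit2_ne_nil l)
      | cons x xs => simp [pvSplit2, if_pos h, pvPrepHead, hS]
    · simp only [List.foldl_cons, pvBStep, if_neg h]
      rw [ih]
      simp [pvSplit2, if_neg h, pvPrepHead_comp]

-- ===== VERDICT (by name: the statement is the Claim_ definition above) =====
theorem break_contact_nos_spec : Claim_equal_break_contact_nos := by
  intro contactno _
  unfold Spec_break_contact_nos break_contact_nos break_contact_nos_alt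
  cases contactno with
  | none => rfl
  | some s =>
    by_cases hs : s = ""
    · simp [hs]
    · simp only [if_neg hs]
      rw [pvB_inv s.toList [] []]
      congr 1
      rw [pvSplitOn_single]
      have hmap : ∀ L : List (List Char),
          (L.foldl (fun acc c => acc ++ PySem.Chars.splitOn c [',']) [])
            = L.flatMap (pvSplitc ',') := by
        intro L
        rw [show (fun (acc : List (List Char)) c => acc ++ PySem.Chars.splitOn c [','])
              = fun acc c => acc ++ pvSplitc ',' c from funext fun _ => funext fun c => by
                rw [pvSplitOn_single]]
        simpa using pvFoldl_append (pvSplitc ',') L []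
      rw [hmap, pvFlat]
      cases hS : pvSplit2 s.toList with
      | nil => exact absurd hS (pvSplit2_ne_nil s.toList)
      | cons x xs => simp [pvPrepHead]
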